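-- pv_equiv track=rewrite | github.com/sheilatrivael/Phyton1 | warm-up-question-510-inverse_skip_letters.py | inverse_skip_letters
-- ===== SOURCE A (Python) =====
-- def inverse_skip_letters(s: str, k: int) -> str:
--   """
--   Returns a string with every kth letter
--   of s removed
--
--   Requires: k > 0
--
--   Examples:
--      inverse_skip_letters("", 3) => ""
--      inverse_skip_letters("a", 3) => ""
--      inverse_skip_letters("banana", 2) => "aaa"
--   """
--
--   ans = ""
--   if (s == "") or (len(s) == 1):
--     return ans
--
--   for i in range(len(s)):
--     if (((i + 1) % k) != 0) and ((i+1) < len(s)):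
--       ans += s[i+1]
--   return ans
--   pass
-- ===== SOURCE B (Python) =====
-- def inverse_skip_letters(s: str, k: int) -> str:
--   """Chunked re-implementation: drop the first char, then take each k-block
--   of the rest minus its last char."""
--   t = s[1:]
--   parts = []
--   while t:
--     parts.append(t[:k - 1])
--     t = t[k:]
--   return ''.join(parts)
-- ===== Notes on version B (the rewrite author's own statement) =====
-- stated objective: faster
-- what changed: Instead of testing (i+1) % k at every index and growing the answer with quadratic string +=, B drops the first character and consumes the rest in k-sized chunks by slicing, keeping each chunk minus its last character and joining the pieces once.
-- outside the precondition, e.g. on inverse_skip_letters('ab', -2): A returns 'b', B does not finish within the time limit; on inverse_skip_letters('xy', 0): A raises ZeroDivisionError, B does not finish within the time limit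
import Mathlib
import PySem

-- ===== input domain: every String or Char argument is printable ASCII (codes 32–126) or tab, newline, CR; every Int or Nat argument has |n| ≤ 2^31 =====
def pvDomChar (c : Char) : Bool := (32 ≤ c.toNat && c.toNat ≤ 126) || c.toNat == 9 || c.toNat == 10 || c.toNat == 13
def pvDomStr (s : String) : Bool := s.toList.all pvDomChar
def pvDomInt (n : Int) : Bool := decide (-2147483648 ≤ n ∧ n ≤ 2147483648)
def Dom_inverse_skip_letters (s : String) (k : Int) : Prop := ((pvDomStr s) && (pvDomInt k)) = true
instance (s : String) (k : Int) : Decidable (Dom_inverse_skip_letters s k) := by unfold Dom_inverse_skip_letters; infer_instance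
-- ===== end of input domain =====

-- B re-implements inverse_skip_letters by chunking s[1:] into blocks of k and dropping each block's
-- last char, instead of A's per-index (i+1) % k test; equivalence proved for k ≥ 1.


-- ===== PORT A =====
-- literal port of A: early return on empty/one-char s, then a foldl over range(len(s)) appending
-- s[i+1] when (i+1) % k ≠ 0 and i+1 < len(s) (that guard keeps the index in range, so s[i+1] is
-- ported with pyGetD; exact under Pre_, where k ≠ 0 keeps '%' defined).
def inverse_skip_letters (s : String) (k : Int) : String :=
  if s = "" ∨ PySem.Str.len s = 1 then String.ofList []
  else
    String.ofList <|
      (PySem.List.pyRange 0 (PySem.Str.len s) 1).foldl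
        (fun ans i =>
          if PySem.Int.mod (i + 1) k ≠ 0 ∧ i + 1 < PySem.Str.len s then
            ans ++ [PySem.List.pyGetD s.toList (i + 1) ' ']
          else ans) []

-- ===== PORT B =====
-- port of Source B's while loop over t = s[1:]; fuel = t.length bounds the iteration count
-- (each pass drops k ≥ 1 characters), a plain totality device, not an algorithm switch.
def pvChunkParts (k : Int) : Nat → List Char → List (List Char)
  | _, [] => []
  | 0, _ => []
  | fuel + 1, c :: cs =>
      PySem.List.slice (c :: cs) none (some (k - 1)) ::
        pvChunkParts k fuel (PySem.List.slice (c :: cs) (some k) none)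

def inverse_skip_letters_alt (s : String) (k : Int) : String :=
  let t := PySem.List.slice s.toList (some 1) none
  String.ofList (PySem.Chars.join [] (pvChunkParts k t.length t))

-- ===== PRECONDITION & SPEC =====
-- Pre_ is the docstring's domain 'Requires: k > 0' (plus the short strings A answers before using k):
-- for k = 0 and len(s) ≥ 2 A raises ZeroDivisionError, and for k < 0 and len(s) ≥ 2 A's value is an
-- accident of Python's signed '%' while B's chunk loop does not terminate.
def Pre_inverse_skip_letters (s : String) (k : Int) : Prop := 1 ≤ k ∨ s.toList.length ≤ 1
instance (s : String) (k : Int) : Decidable (Pre_inverse_skip_letters s k) := by unfold Pre_inverse_skip_letters; infer_instance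
def pvWitness_inverse_skip_letters : String × Int := ("banana", 2)

def Spec_inverse_skip_letters (s : String) (k : Int) (out : String) : Prop := out = inverse_skip_letters_alt s k
instance (s : String) (k : Int) (out : String) : Decidable (Spec_inverse_skip_letters s k out) := by unfold Spec_inverse_skip_letters; infer_instance

-- ===== CLAIM (what is proved, stated in full; the proofs are below) =====
def Claim_equal_inverse_skip_letters : Prop := ∀ (s : String) (k : Int), Dom_inverse_skip_letters s k → Pre_inverse_skip_letters s k → Spec_inverse_skip_letters s k (inverse_skip_letters s k)

-- ===== LEMMAS AND PROOFS =====

-- the common characterisation: the characters of cs kept at positions m with (m+1) % kn ≠ 0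
def pvSel (kn : Nat) (cs : List Char) : List Char :=
  ((List.range cs.length).filter (fun m => decide ((m + 1) % kn ≠ 0))).map (fun m => cs.getD m ' ')

theorem pvMapRange_take (cs : List Char) (j : Nat) (h : j ≤ cs.length) :
    (List.range j).map (fun m => cs.getD m ' ') = cs.take j := by
  apply List.ext_getElem
  · simp [h]
  · intro i h1 h2
    simp only [List.getElem_map, List.getElem_range, List.getElem_take]
    rw [List.getD_eq_getElem]

theorem pvRangeFilterLt (n j : Nat) :
    (List.range n).filter (fun m => decide (m < j)) = List.range (min j n) := by
  induction n with
  | zero => simp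
  | succ n ih =>
    rw [List.range_succ, List.filter_append, ih]
    by_cases h : n < j
    · have h1 : min j (n+1) = n + 1 := by omega
      have h2 : min j n = n := by omega
      rw [h1, h2, List.range_succ]
      simp [h]
    · have h1 : min j (n+1) = min j n := by omega
      rw [h1]; simp [h]

theorem pvModCond (kn m : Nat) (hk : 1 ≤ kn) (hm : m < kn) :
    (decide ((m + 1) % kn ≠ 0)) = decide (m < kn - 1) := by
  by_cases h : m + 1 < kn
  · rw [Nat.mod_eq_of_lt h]; simp; omega
  · have : m + 1 = kn := by omega
    rw [this, Nat.mod_self]; simp; omega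

theorem pvSel_step (kn : Nat) (hk : 1 ≤ kn) (cs : List Char) :
    pvSel kn cs = cs.take (kn - 1) ++ pvSel kn (cs.drop kn) := by
  unfold pvSel
  by_cases hle : cs.length ≤ kn
  · have hd : cs.drop kn = [] := List.drop_eq_nil_of_le hle
    rw [hd]
    simp only [List.length_nil, List.range_zero, List.filter_nil, List.map_nil, List.append_nil]
    rw [List.filter_congr (fun m hm => pvModCond kn m hk (by
      have := List.mem_range.mp hm; omega))]
    rw [pvRangeFilterLt]
    rw [pvMapRange_take cs _ (by omega)]
    rcases Nat.le_total (kn - 1) cs.length with h | h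
    · rw [Nat.min_eq_left h]
    · rw [Nat.min_eq_right h, List.take_length, List.take_of_length_le h]
  · push Not at hle
    have hsplit : List.range cs.length = List.range kn ++ (List.range (cs.length - kn)).map (kn + ·) := by
      rw [← List.range_add]; congr 1; omega
    rw [hsplit, List.filter_append, List.map_append]
    congr 1
    · rw [List.filter_congr (fun m hm => pvModCond kn m hk (List.mem_range.mp hm))]
      rw [pvRangeFilterLt, Nat.min_eq_left (by omega), pvMapRange_take cs _ (by omega)]
    · rw [List.filter_map, List.map_map]
      have hlen : (cs.drop kn).length = cs.length - kn := by simp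
      rw [hlen]
      rw [List.filter_congr (fun m _ => by
        show (decide ((kn + m + 1) % kn ≠ 0)) = decide ((m + 1) % kn ≠ 0)
        rw [Nat.add_assoc, Nat.add_mod_left])]
      apply List.map_congr_left
      intro m hm
      have hm' : m < cs.length - kn := by
        have := List.mem_filter.mp hm; exact List.mem_range.mp this.1
      show cs.getD (kn + m) ' ' = (cs.drop kn).getD m ' '
      rw [List.getD_eq_getElem?_getD, List.getD_eq_getElem?_getD, List.getElem?_drop]

theorem pvJoin_nil_cons (a : List Char) (l : List (List Char)) :
    PySem.Chars.join [] (a :: l) = a ++ PySem.Chars.join [] l := by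
  cases l <;> simp [PySem.Chars.join, List.intercalate]

theorem pvChunk_eq_sel (kn : Nat) (hk : 1 ≤ kn) (fuel : Nat) : ∀ (cs : List Char),
    cs.length ≤ fuel → PySem.Chars.join [] (pvChunkParts (kn : Int) fuel cs) = pvSel kn cs := by
  induction fuel with
  | zero =>
    intro cs hf
    have : cs = [] := List.eq_nil_of_length_eq_zero (by omega)
    subst this
    simp [pvChunkParts, pvSel, PySem.Chars.join, List.intercalate]
  | succ fuel ih =>
    intro cs hf
    match cs with
    | [] => simp [pvChunkParts, pvSel, PySem.Chars.join, List.intercalate]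
    | c :: t =>
      rw [show pvChunkParts (kn : Int) (fuel+1) (c :: t)
          = PySem.List.slice (c :: t) none (some ((kn:Int) - 1)) ::
            pvChunkParts (kn : Int) fuel (PySem.List.slice (c :: t) (some (kn : Int)) none) from rfl]
      rw [pvJoin_nil_cons]
      rw [PySem.List.slice_to _ (by omega), PySem.List.slice_from _ (by omega)]
      have h1 : (((kn:Int)) - 1).toNat = kn - 1 := by omega
      have h2 : ((kn:Int)).toNat = kn := by omega
      rw [h1, h2]
      rw [ih _ (by simp at hf ⊢; omega)]
      exact (pvSel_step kn hk (c :: t)).symm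

theorem pvFold_eq (cs : List Char) (kn : Nat) (h2 : 2 ≤ cs.length) :
    (PySem.List.pyRange 0 (cs.length : Int) 1).foldl
      (fun ans i =>
        if PySem.Int.mod (i + 1) (kn : Int) ≠ 0 ∧ i + 1 < (cs.length : Int) then
          ans ++ [PySem.List.pyGetD cs (i + 1) ' ']
        else ans) []
    = pvSel kn cs.tail := by
  rw [PySem.List.foldl_append_ite
    (fun i => PySem.Int.mod (i + 1) (kn : Int) ≠ 0 ∧ i + 1 < (cs.length : Int))
    (fun i => PySem.List.pyGetD cs (i + 1) ' ')]
  rw [List.nil_append, PySem.List.pyRange_one]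
  have h0 : ((cs.length : Int) - 0).toNat = cs.length := by omega
  rw [h0]
  rw [List.filter_map, List.map_map]
  rw [List.filter_congr (l := List.range cs.length)
    (q := fun m => decide ((m + 1) % kn ≠ 0) && decide (m < cs.length - 1))
    (fun m hm => by
      have hmn := List.mem_range.mp hm
      show decide (PySem.Int.mod ((0 : Int) + (m:Int) + 1) (kn : Int) ≠ 0 ∧ (0:Int) + (m:Int) + 1 < (cs.length : Int)) = _
      have e1 : (0 : Int) + (m:Int) + 1 = ((m + 1 : Nat) : Int) := by push_cast; ring
      rw [e1, PySem.Int.mod_natCast]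
      have h1 : ((((m + 1) % kn : Nat)) : Int) ≠ 0 ↔ (m + 1) % kn ≠ 0 := by omega
      have h2' : (((m + 1 : Nat)) : Int) < (cs.length : Int) ↔ m < cs.length - 1 := by omega
      simp only [h1, h2']
      simp)]
  rw [← List.filter_filter, pvRangeFilterLt, Nat.min_eq_left (by omega)]
  unfold pvSel
  have hlt : cs.tail.length = cs.length - 1 := by simp
  rw [hlt]
  apply List.map_congr_left
  intro m hm
  have hmr : m < cs.length - 1 := List.mem_range.mp (List.mem_filter.mp hm).1
  show PySem.List.pyGetD cs ((0:Int) + (m:Int) + 1) ' ' = cs.tail.getD m ' '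
  have e1 : (0 : Int) + (m:Int) + 1 = ((m + 1 : Nat) : Int) := by push_cast; ring
  rw [e1, PySem.List.pyGetD_natCast]
  rw [List.getD_eq_getElem?_getD, List.getD_eq_getElem?_getD, List.getElem?_tail]

theorem pvA_eq_sel (s : String) (kn : Nat) :
    inverse_skip_letters s (kn : Int) = String.ofList (pvSel kn s.toList.tail) := by
  unfold inverse_skip_letters
  by_cases h : s = "" ∨ PySem.Str.len s = 1
  · rw [if_pos h]
    have hlen : s.toList.length ≤ 1 := by
      rcases h with h | h
      · subst h; simp
      · rw [PySem.Str.len_eq] at h; omega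
    have ht : s.toList.tail = [] := List.eq_nil_of_length_eq_zero (by rw [List.length_tail]; omega)
    rw [ht]; rfl
  · rw [if_neg h]
    have hlen2 : 2 ≤ s.toList.length := by
      have h1 : s.toList ≠ [] := fun hnil => h (Or.inl (String.toList_eq_nil_iff.mp hnil))
      have h2 : s.toList.length ≠ 1 := fun he => h (Or.inr (by rw [PySem.Str.len_eq, he]; rfl))
      have := List.length_pos_of_ne_nil h1
      omega
    simp only [PySem.Str.len_eq]
    exact congrArg String.ofList (pvFold_eq s.toList kn hlen2)

-- ===== VERDICT (by name: the statement is the Claim_ definition above) =====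
theorem inverse_skip_letters_spec : Claim_equal_inverse_skip_letters := by
  intro s k _ hk
  unfold Spec_inverse_skip_letters
  rcases em (1 ≤ k) with hk' | hk'
  case inr =>
    -- k ≤ 0 but len(s) ≤ 1: A answers before ever using k, B's chunk list is empty
    have hlen : s.toList.length ≤ 1 := hk.resolve_left hk'
    have hA : inverse_skip_letters s k = String.ofList [] := by
      unfold inverse_skip_letters
      rw [if_pos]
      rcases Nat.lt_or_ge s.toList.length 1 with h | h
      · exact Or.inl (String.toList_eq_nil_iff.mp (List.eq_nil_of_length_eq_zero (by omega)))
      · exact Or.inr (by rw [PySem.Str.len_eq]; omega)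
    have hB : inverse_skip_letters_alt s k = String.ofList [] := by
      show String.ofList (PySem.Chars.join [] (pvChunkParts k (PySem.List.slice s.toList (some 1) none).length (PySem.List.slice s.toList (some 1) none))) = _
      rw [PySem.List.slice_from_one]
      have ht : s.toList.tail = [] := List.eq_nil_of_length_eq_zero (by rw [List.length_tail]; omega)
      rw [ht]
      rfl
    rw [hA, hB]
  obtain ⟨kn, rfl⟩ : ∃ kn : Nat, k = (kn : Int) := ⟨k.toNat, (Int.toNat_of_nonneg (by omega)).symm⟩
  have hk1 : 1 ≤ kn := by exact_mod_cast hk'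
  rw [pvA_eq_sel s kn]
  show _ = String.ofList (PySem.Chars.join [] (pvChunkParts ((kn : Int)) (PySem.List.slice s.toList (some 1) none).length (PySem.List.slice s.toList (some 1) none)))
  rw [PySem.List.slice_from_one, pvChunk_eq_sel kn hk1 _ _ (le_refl _)]
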